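-- pv_equiv track=rewrite | github.com/LydiaCai1203/AutoSpecMan | autospecman/detectors/history.py | _detect_branch_strategy
-- ===== SOURCE A (Python) =====
-- from typing import List, Optional
--
-- def _detect_branch_strategy(branches: List[str]) -> Optional[str]:
--     """Detect common branch strategies."""
--     branch_lower = {b.lower() for b in branches}
--
--     has_main = "main" in branch_lower
--     has_master = "master" in branch_lower
--     has_develop = "develop" in branch_lower or "dev" in branch_lower
--     has_release = any("release" in b.lower() for b in branches)
--     has_feature = any("feature" in b.lower() or "feat" in b.lower() for b in branches)
--     has_hotfix = any("hotfix" in b.lower() for b in branches)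
--
--     if has_develop and (has_feature or has_release or has_hotfix):
--         return "git-flow"
--     if has_main or has_master:
--         if has_develop:
--             return "github-flow-with-develop"
--         if has_feature or has_hotfix:
--             return "feature-branch"
--         return "trunk-based"
--     return None
-- ===== SOURCE B (Python) =====
-- from typing import List, Optional
--
-- _TABLE = [None, None, "trunk-based", "github-flow-with-develop",
--           None, "git-flow", "trunk-based", "git-flow",
--           None, None, "feature-branch", "github-flow-with-develop",
--           None, "git-flow", "feature-branch", "git-flow"]
--
-- def _classify(lb: str) -> int:
--     """Bitmask contribution of one lowercased branch name."""
--     m = 0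
--     if lb == "develop" or lb == "dev":
--         m |= 1
--     if lb == "main" or lb == "master":
--         m |= 2
--     if "release" in lb:
--         m |= 4
--     if "feature" in lb or "feat" in lb or "hotfix" in lb:
--         m |= 12
--     return m
--
-- def _detect_branch_strategy(branches: List[str]) -> Optional[str]:
--     """Table-driven: OR together per-branch bitmasks, look the result up."""
--     mask = 0
--     for b in branches:
--         mask |= _classify(b.lower())
--     return _TABLE[mask]
-- ===== Notes on version B (the rewrite author's own statement) =====
-- stated objective: alternative
-- what changed: Replaces A's six boolean flags and nested if-decision-tree with a bitmask encoding: each branch is mapped once to a 4-bit contribution (develop/main-master/release-or-feature-or-hotfix/feature-or-hotfix), the masks are OR-folded, and the answer is read from a precomputed 16-entry lookup table, eliminating the decision tree and the repeated any()-scans.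
import Mathlib
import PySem

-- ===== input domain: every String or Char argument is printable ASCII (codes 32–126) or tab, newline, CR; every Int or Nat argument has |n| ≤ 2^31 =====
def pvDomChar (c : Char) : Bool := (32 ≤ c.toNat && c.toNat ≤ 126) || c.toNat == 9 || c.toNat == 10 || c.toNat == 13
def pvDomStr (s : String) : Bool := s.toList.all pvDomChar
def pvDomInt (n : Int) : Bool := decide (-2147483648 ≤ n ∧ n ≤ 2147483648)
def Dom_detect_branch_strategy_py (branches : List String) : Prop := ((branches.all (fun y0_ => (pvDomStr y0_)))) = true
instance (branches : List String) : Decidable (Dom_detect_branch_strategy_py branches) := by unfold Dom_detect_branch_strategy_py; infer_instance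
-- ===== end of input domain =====

-- B replaces A's six flags and nested decision tree with per-branch 4-bit masks OR-folded into one index into a 16-entry lookup table (objective: alternative).


-- ===== PORT A =====
def detect_branch_strategy_py (branches : List String) : Option String :=
  let branch_lower := PySem.Set.ofList (branches.map (fun b => PySem.Str.lower b))
  let has_main := PySem.Set.contains branch_lower "main"
  let has_master := PySem.Set.contains branch_lower "master"
  let has_develop := PySem.Set.contains branch_lower "develop" || PySem.Set.contains branch_lower "dev"
  let has_release := branches.any (fun b => PySem.Str.isIn "release" (PySem.Str.lower b))
  let has_feature := branches.any (fun b => PySem.Str.isIn "feature" (PySem.Str.lower b) || PySem.Str.isIn "feat" (PySem.Str.lower b))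
  let has_hotfix := branches.any (fun b => PySem.Str.isIn "hotfix" (PySem.Str.lower b))
  if has_develop && (has_feature || has_release || has_hotfix) then some "git-flow"
  else if has_main || has_master then
    if has_develop then some "github-flow-with-develop"
    else if has_feature || has_hotfix then some "feature-branch"
    else some "trunk-based"
  else none

-- ===== PORT B =====
-- the 16-entry outcome table, indexed by the OR of the per-branch bitmasks
def pvTableB : List (Option String) :=
  [none, none, some "trunk-based", some "github-flow-with-develop",
   none, some "git-flow", some "trunk-based", some "git-flow",
   none, none, some "feature-branch", some "github-flow-with-develop",
   none, some "git-flow", some "feature-branch", some "git-flow"]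

-- bitmask contribution of one lowercased branch name (Source B's _classify)
def pvClassifyB (lb : String) : Nat :=
  let m := 0
  let m := if lb == "develop" || lb == "dev" then m ||| 1 else m
  let m := if lb == "main" || lb == "master" then m ||| 2 else m
  let m := if PySem.Str.isIn "release" lb then m ||| 4 else m
  let m := if PySem.Str.isIn "feature" lb || PySem.Str.isIn "feat" lb || PySem.Str.isIn "hotfix" lb then m ||| 12 else m
  m

def detect_branch_strategy_py_alt (branches : List String) : Option String :=
  let mask := branches.foldl (fun mask b => mask ||| pvClassifyB (PySem.Str.lower b)) 0
  pvTableB.getD mask none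

-- ===== PRECONDITION & SPEC =====
def Spec_detect_branch_strategy_py (branches : List String) (out : Option String) : Prop := out = detect_branch_strategy_py_alt branches
instance (branches : List String) (out : Option String) : Decidable (Spec_detect_branch_strategy_py branches out) := by unfold Spec_detect_branch_strategy_py; infer_instance

-- ===== CLAIM (what is proved, stated in full; the proofs are below) =====
def Claim_equal_detect_branch_strategy_py : Prop := ∀ (branches : List String), Dom_detect_branch_strategy_py branches → Spec_detect_branch_strategy_py branches (detect_branch_strategy_py branches)

-- ===== LEMMAS AND PROOFS =====

-- encoding of four flag bits as the mask value the fold produces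
def pvEnc (a b c d : Bool) : Nat :=
  (if a then 1 else 0) ||| (if b then 2 else 0) ||| (if c then 4 else 0) ||| (if d then 8 else 0)

-- pvClassifyB is pvEnc of the four per-branch predicates
theorem pvClassifyB_eq (lb : String) :
    pvClassifyB lb =
      pvEnc (lb == "develop" || lb == "dev") (lb == "main" || lb == "master")
        (PySem.Str.isIn "release" lb || (PySem.Str.isIn "feature" lb || PySem.Str.isIn "feat" lb || PySem.Str.isIn "hotfix" lb))
        (PySem.Str.isIn "feature" lb || PySem.Str.isIn "feat" lb || PySem.Str.isIn "hotfix" lb) := by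
  unfold pvClassifyB pvEnc
  cases (lb == "develop" || lb == "dev") <;>
  cases (lb == "main" || lb == "master") <;>
  cases PySem.Str.isIn "release" lb <;>
  cases (PySem.Str.isIn "feature" lb || PySem.Str.isIn "feat" lb || PySem.Str.isIn "hotfix" lb) <;>
    decide

-- ORing two encodings joins the flags pointwise
theorem pvEnc_or (a b c d a' b' c' d' : Bool) :
    pvEnc a b c d ||| pvEnc a' b' c' d' = pvEnc (a || a') (b || b') (c || c') (d || d') := by
  cases a <;> cases b <;> cases c <;> cases d <;> cases a' <;> cases b' <;> cases c' <;> cases d' <;> decide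

-- the fold computes pvEnc of the any-scans
theorem pvFold_eq (l : List String) (a b c d : Bool) :
    l.foldl (fun mask x => mask ||| pvClassifyB (PySem.Str.lower x)) (pvEnc a b c d) =
      pvEnc (a || l.any (fun x => PySem.Str.lower x == "develop" || PySem.Str.lower x == "dev"))
            (b || l.any (fun x => PySem.Str.lower x == "main" || PySem.Str.lower x == "master"))
            (c || l.any (fun x => PySem.Str.isIn "release" (PySem.Str.lower x) ||
                  (PySem.Str.isIn "feature" (PySem.Str.lower x) || PySem.Str.isIn "feat" (PySem.Str.lower x) || PySem.Str.isIn "hotfix" (PySem.Str.lower x))))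
            (d || l.any (fun x => PySem.Str.isIn "feature" (PySem.Str.lower x) || PySem.Str.isIn "feat" (PySem.Str.lower x) || PySem.Str.isIn "hotfix" (PySem.Str.lower x))) := by
  induction l generalizing a b c d with
  | nil => simp
  | cons h t ih =>
    rw [List.foldl_cons, pvClassifyB_eq (PySem.Str.lower h), pvEnc_or, ih]
    simp [List.any_cons, Bool.or_assoc]

-- set membership of the lowercased-branch set is an any-scan
theorem pvContains_eq (branches : List String) (x : String) :
    PySem.Set.contains (PySem.Set.ofList (branches.map (fun b => PySem.Str.lower b))) x =
      branches.any (fun b => PySem.Str.lower b == x) := by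
  rw [Bool.eq_iff_iff, PySem.Set.contains_iff, PySem.Set.mem_ofList]
  simp only [List.any_eq_true, List.mem_map, beq_iff_eq]

-- an any-scan of a disjunction splits into two any-scans
theorem pvAnyOr (l : List String) (p q : String → Bool) :
    l.any (fun b => p b || q b) = (l.any p || l.any q) := by
  rw [Bool.eq_iff_iff]
  simp only [List.any_eq_true, Bool.or_eq_true]
  constructor
  · rintro ⟨b, hb, h | h⟩; exacts [Or.inl ⟨b, hb, h⟩, Or.inr ⟨b, hb, h⟩]
  · rintro (⟨b, hb, h⟩ | ⟨b, hb, h⟩) <;> exact ⟨b, hb, by simp [h]⟩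

-- ===== VERDICT (by name: the statement is the Claim_ definition above) =====
theorem detect_branch_strategy_py_spec : Claim_equal_detect_branch_strategy_py := by
  intro branches _
  unfold Spec_detect_branch_strategy_py detect_branch_strategy_py detect_branch_strategy_py_alt
  have h0 : (0 : Nat) = pvEnc false false false false := by decide
  rw [h0, pvFold_eq]
  simp only [pvContains_eq, Bool.false_or, pvAnyOr]
  cases branches.any (fun b => PySem.Str.lower b == "develop") <;>
  cases branches.any (fun b => PySem.Str.lower b == "dev") <;>
  cases branches.any (fun b => PySem.Str.lower b == "main") <;>
  cases branches.any (fun b => PySem.Str.lower b == "master") <;>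
  cases branches.any (fun b => PySem.Str.isIn "release" (PySem.Str.lower b)) <;>
  cases branches.any (fun b => PySem.Str.isIn "feature" (PySem.Str.lower b)) <;>
  cases branches.any (fun b => PySem.Str.isIn "feat" (PySem.Str.lower b)) <;>
  cases branches.any (fun b => PySem.Str.isIn "hotfix" (PySem.Str.lower b)) <;>
    rfl
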